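-- pv_equiv track=rewrite | github.com/sagearbor/dcri-mcp-tools | tools/faq_generator.py | _format_faqs_html
-- ===== SOURCE A (Python) =====
-- from typing import Dict, List, Optional, Tuple
--
-- def _format_faqs_html(faqs: List[Dict], target_audience: str) -> str:
--     """Format FAQs as HTML."""
--     html = f"""
--     <!DOCTYPE html>
--     <html>
--     <head>
--         <title>{_get_faq_title(target_audience)}</title>
--         <style>
--             body {{ font-family: Arial, sans-serif; margin: 20px; line-height: 1.6; }}
--             .faq-section {{ margin-bottom: 30px; }}
--             .category {{ background-color: #f8f9fa; padding: 15px; margin-bottom: 20px; border-left: 4px solid #007cba; }}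
--             .category-title {{ font-size: 1.3em; font-weight: bold; color: #007cba; margin-bottom: 10px; }}
--             .faq-item {{ margin-bottom: 15px; padding: 10px; border: 1px solid #e0e0e0; border-radius: 5px; }}
--             .question {{ font-weight: bold; color: #333; margin-bottom: 8px; }}
--             .answer {{ color: #555; }}
--             .priority-high {{ border-left: 4px solid #dc3545; }}
--             .priority-medium {{ border-left: 4px solid #ffc107; }}
--             .priority-low {{ border-left: 4px solid #28a745; }}
--         </style>
--     </head>
--     <body>
--         <h1>{_get_faq_title(target_audience)}</h1>
--         <div class="introduction">{_get_faq_introduction(target_audience)}</div>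
--     """
--
--     # Group by category
--     categories = {}
--     for faq in faqs:
--         category = faq.get('category', 'General')
--         if category not in categories:
--             categories[category] = []
--         categories[category].append(faq)
--
--     # Generate HTML for each category
--     for category, category_faqs in categories.items():
--         html += f"""
--         <div class="faq-section">
--             <div class="category">
--                 <div class="category-title">{category}</div>
--         """
--
--         for faq in category_faqs:
--             priority_class = f"priority-{faq.get('priority', 'medium')}"
--             html += f"""
--                 <div class="faq-item {priority_class}">
--                     <div class="question">{faq.get('question', '')}</div>
--                     <div class="answer">{faq.get('answer', '')}</div>
--                 </div>
--             """
--
--         html += "</div></div>"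
--
--     html += """
--     </body>
--     </html>
--     """
--
--     return html
--
-- def _get_faq_title(target_audience: str) -> str:
--     """Get appropriate title for FAQ."""
--     titles = {
--         'participants': 'Frequently Asked Questions for Study Participants',
--         'investigators': 'Investigator FAQ - Study Protocol Questions',
--         'staff': 'Study Staff FAQ - Operational Questions',
--         'all': 'Study FAQ - Common Questions and Answers'
--     }
--     return titles.get(target_audience, titles['all'])
--
-- def _get_faq_introduction(target_audience: str) -> str:
--     """Get appropriate introduction for FAQ."""
--     introductions = {
--         'participants': 'This document answers common questions from study participants. If you have additional questions, please contact the study team.',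
--         'investigators': 'This FAQ addresses common protocol and operational questions from study investigators and site staff.',
--         'staff': 'This document provides answers to frequently asked operational questions from study staff.',
--         'all': 'This FAQ addresses common questions about the study. Please contact the study team if you need additional information.'
--     }
--     return introductions.get(target_audience, introductions['all'])
-- ===== SOURCE B (Python) =====
-- def _format_faqs_html(faqs, target_audience):
--     """Format FAQs as HTML: build the ordered-unique category list, then assemble
--     the page as head + ''.join(per-category sections) + tail (expression style,
--     no string accumulator)."""
--     title = _get_faq_title(target_audience)
--     intro = _get_faq_introduction(target_audience)
--
--     head = f"""
--     <!DOCTYPE html>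
--     <html>
--     <head>
--         <title>{title}</title>
--         <style>
--             body {{ font-family: Arial, sans-serif; margin: 20px; line-height: 1.6; }}
--             .faq-section {{ margin-bottom: 30px; }}
--             .category {{ background-color: #f8f9fa; padding: 15px; margin-bottom: 20px; border-left: 4px solid #007cba; }}
--             .category-title {{ font-size: 1.3em; font-weight: bold; color: #007cba; margin-bottom: 10px; }}
--             .faq-item {{ margin-bottom: 15px; padding: 10px; border: 1px solid #e0e0e0; border-radius: 5px; }}
--             .question {{ font-weight: bold; color: #333; margin-bottom: 8px; }}
--             .answer {{ color: #555; }}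
--             .priority-high {{ border-left: 4px solid #dc3545; }}
--             .priority-medium {{ border-left: 4px solid #ffc107; }}
--             .priority-low {{ border-left: 4px solid #28a745; }}
--         </style>
--     </head>
--     <body>
--         <h1>{title}</h1>
--         <div class="introduction">{intro}</div>
--     """
--
--     def item(faq):
--         return f"""
--                 <div class="faq-item priority-{faq.get('priority', 'medium')}">
--                     <div class="question">{faq.get('question', '')}</div>
--                     <div class="answer">{faq.get('answer', '')}</div>
--                 </div>
--             """
--
--     def section(category):
--         return (f"""
--         <div class="faq-section">
--             <div class="category">
--                 <div class="category-title">{category}</div>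
--         """
--                 + "".join(item(f) for f in faqs if f.get('category', 'General') == category)
--                 + "</div></div>")
--
--     categories = list(dict.fromkeys(f.get('category', 'General') for f in faqs))
--     return head + "".join(section(c) for c in categories) + """
--     </body>
--     </html>
--     """
--
--
-- def _get_faq_title(target_audience):
--     titles = {
--         'participants': 'Frequently Asked Questions for Study Participants',
--         'investigators': 'Investigator FAQ - Study Protocol Questions',
--         'staff': 'Study Staff FAQ - Operational Questions',
--         'all': 'Study FAQ - Common Questions and Answers'
--     }
--     return titles.get(target_audience, titles['all'])
--
--
-- def _get_faq_introduction(target_audience):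
--     introductions = {
--         'participants': 'This document answers common questions from study participants. If you have additional questions, please contact the study team.',
--         'investigators': 'This FAQ addresses common protocol and operational questions from study investigators and site staff.',
--         'staff': 'This document provides answers to frequently asked operational questions from study staff.',
--         'all': 'This FAQ addresses common questions about the study. Please contact the study team if you need additional information.'
--     }
--     return introductions.get(target_audience, introductions['all'])
-- ===== Notes on version B (the rewrite author's own statement) =====
-- stated objective: alternative
-- what changed: A imperatively builds a category->list grouping dict and grows one html string accumulator across nested loops; B is a pure expression: it computes the ordered-unique category list with dict.fromkeys and returns head + ''.join(section(c) for c in categories) + tail, each section joining the items selected from faqs by a filtering comprehension.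
import Mathlib
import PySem

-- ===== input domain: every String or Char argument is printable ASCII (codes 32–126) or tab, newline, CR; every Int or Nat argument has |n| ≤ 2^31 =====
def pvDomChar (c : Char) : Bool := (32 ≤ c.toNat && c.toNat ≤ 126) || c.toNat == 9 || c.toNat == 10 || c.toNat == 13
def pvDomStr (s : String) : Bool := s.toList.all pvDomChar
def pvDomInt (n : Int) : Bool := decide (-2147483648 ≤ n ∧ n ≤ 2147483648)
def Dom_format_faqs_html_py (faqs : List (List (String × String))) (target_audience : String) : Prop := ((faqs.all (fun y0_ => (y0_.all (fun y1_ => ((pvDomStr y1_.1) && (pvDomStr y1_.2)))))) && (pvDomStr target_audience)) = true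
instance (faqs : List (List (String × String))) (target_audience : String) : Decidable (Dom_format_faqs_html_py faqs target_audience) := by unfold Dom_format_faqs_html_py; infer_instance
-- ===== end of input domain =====

-- B replaces A's mutable category→list grouping dict and string accumulator by a
-- pure expression: head ++ "".join(sections over the ordered-unique categories,
-- each section joining the matching items) ++ tail; objective: alternative.

-- shared literal HTML fragments and the two text lookups (identical f-string text in A and B)
def pvS_hd1 : String := "\n    <!DOCTYPE html>\n    <html>\n    <head>\n        <title>"
def pvS_hd2 : String := "</title>\n        <style>\n            body { font-family: Arial, sans-serif; margin: 20px; line-height: 1.6; }\n            .faq-section { margin-bottom: 30px; }\n            .category { background-color: #f8f9fa; padding: 15px; margin-bottom: 20px; border-left: 4px solid #007cba; }\n            .category-title { font-size: 1.3em; font-weight: bold; color: #007cba; margin-bottom: 10px; }\n            .faq-item { margin-bottom: 15px; padding: 10px; border: 1px solid #e0e0e0; border-radius: 5px; }\n            .question { font-weight: bold; color: #333; margin-bottom: 8px; }\n            .answer { color: #555; }\n            .priority-high { border-left: 4px solid #dc3545; }\n            .priority-medium { border-left: 4px solid #ffc107; }\n            .priority-low { border-left: 4px solid #28a745; }\n        </style>\n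    </head>\n    <body>\n        <h1>"
def pvS_hd3 : String := "</h1>\n        <div class=\"introduction\">"
def pvS_hd4 : String := "</div>\n    "
def pvS_tail : String := "\n    </body>\n    </html>\n    "
def pvS_ch1 : String := "\n        <div class=\"faq-section\">\n            <div class=\"category\">\n                <div class=\"category-title\">"
def pvS_ch2 : String := "</div>\n        "
def pvS_it1 : String := "\n                <div class=\"faq-item priority-"
def pvS_it2 : String := "\">\n                    <div class=\"question\">"
def pvS_it3 : String := "</div>\n                    <div class=\"answer\">"
def pvS_it4 : String := "</div>\n                </div>\n            "

-- _get_faq_title (titles.get with default titles['all'])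
def pvTitle (target_audience : String) : String :=
  PySem.Dict.getD (PySem.Dict.mk
    [("participants", "Frequently Asked Questions for Study Participants"),
     ("investigators", "Investigator FAQ - Study Protocol Questions"),
     ("staff", "Study Staff FAQ - Operational Questions"),
     ("all", "Study FAQ - Common Questions and Answers")])
    target_audience "Study FAQ - Common Questions and Answers"

-- _get_faq_introduction
def pvIntro (target_audience : String) : String :=
  PySem.Dict.getD (PySem.Dict.mk
    [("participants", "This document answers common questions from study participants. If you have additional questions, please contact the study team."),
     ("investigators", "This FAQ addresses common protocol and operational questions from study investigators and site staff."),
     ("staff", "This document provides answers to frequently asked operational questions from study staff."),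
     ("all", "This FAQ addresses common questions about the study. Please contact the study team if you need additional information.")])
    target_audience "This FAQ addresses common questions about the study. Please contact the study team if you need additional information."

-- faq.get('category', 'General')
def pvCat (faq : List (String × String)) : String :=
  PySem.Dict.getD (PySem.Dict.mk faq) "category" "General"

-- ===== PORT A =====
def format_faqs_html_py (faqs : List (List (String × String))) (target_audience : String) : String :=
  let html := pvS_hd1 ++ pvTitle target_audience ++ pvS_hd2 ++ pvTitle target_audience ++
              pvS_hd3 ++ pvIntro target_audience ++ pvS_hd4
  -- Group by category: if category not in categories: categories[category] = []; append
  let categories : PySem.Dict String (List (List (String × String))) :=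
    faqs.foldl (fun d faq =>
      let category := pvCat faq
      let d := if d.contains category = false then d.insert category [] else d
      d.insert category (d.getD category [] ++ [faq])) PySem.Dict.empty
  -- for category, category_faqs in categories.items(): html += …
  let html := categories.items.foldl (fun h p =>
      let h := h ++ pvS_ch1 ++ p.1 ++ pvS_ch2
      let h := p.2.foldl (fun h faq =>
          h ++ pvS_it1 ++ PySem.Dict.getD (PySem.Dict.mk faq) "priority" "medium" ++ pvS_it2 ++
          PySem.Dict.getD (PySem.Dict.mk faq) "question" "" ++ pvS_it3 ++
          PySem.Dict.getD (PySem.Dict.mk faq) "answer" "" ++ pvS_it4) h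
      h ++ "</div></div>") html
  html ++ pvS_tail

-- ===== PORT B =====
-- Source B's local 'item(faq)'
def pvBItem (faq : List (String × String)) : String :=
  pvS_it1 ++ PySem.Dict.getD (PySem.Dict.mk faq) "priority" "medium" ++ pvS_it2 ++
  PySem.Dict.getD (PySem.Dict.mk faq) "question" "" ++ pvS_it3 ++
  PySem.Dict.getD (PySem.Dict.mk faq) "answer" "" ++ pvS_it4

-- Source B's local 'section(category)': header + join of the matching items + closer
def pvBSection (faqs : List (List (String × String))) (category : String) : String :=
  pvS_ch1 ++ category ++ pvS_ch2 ++
  String.join ((faqs.filter (fun f => pvCat f == category)).map pvBItem) ++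
  "</div></div>"

def format_faqs_html_py_alt (faqs : List (List (String × String))) (target_audience : String) : String :=
  let title := pvTitle target_audience
  let intro := pvIntro target_audience
  let head := pvS_hd1 ++ title ++ pvS_hd2 ++ title ++ pvS_hd3 ++ intro ++ pvS_hd4
  -- categories = list(dict.fromkeys(f.get('category','General') for f in faqs))
  let categories := PySem.List.dedup (faqs.map pvCat)
  head ++ String.join (categories.map (pvBSection faqs)) ++ pvS_tail

-- ===== PRECONDITION & SPEC =====
def Spec_format_faqs_html_py (faqs : List (List (String × String))) (target_audience : String) (out : String) : Prop := out = format_faqs_html_py_alt faqs target_audience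
instance (faqs : List (List (String × String))) (target_audience : String) (out : String) : Decidable (Spec_format_faqs_html_py faqs target_audience out) := by unfold Spec_format_faqs_html_py; infer_instance

-- ===== CLAIM (what is proved, stated in full; the proofs are below) =====
def Claim_equal_format_faqs_html_py : Prop := ∀ (faqs : List (List (String × String))) (target_audience : String), Dom_format_faqs_html_py faqs target_audience → Spec_format_faqs_html_py faqs target_audience (format_faqs_html_py faqs target_audience)

-- ===== LEMMAS AND PROOFS =====

-- A's grouping step is Dict.modify
theorem pvStep_eq_modify (d : PySem.Dict String (List (List (String × String))))
    (faq : List (String × String)) :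
    (let category := pvCat faq
     let d := if d.contains category = false then d.insert category [] else d
     d.insert category (d.getD category [] ++ [faq]))
    = d.modify (pvCat faq) [] (· ++ [faq]) := by
  by_cases h : d.contains (pvCat faq) = false
  · simp only [h, if_true]
    rw [PySem.Dict.getD_insert_self, PySem.Dict.insert_insert_self, PySem.Dict.modify,
        PySem.Dict.getD_of_not_contains (h := h)]
  · have h' : d.contains (pvCat faq) = true := by simpa using h
    simp only [h', PySem.Dict.modify]
    simp

-- the grouping dict's items: categories in first-encounter order, each with its filtered faqs
theorem pvItems_char (faqs : List (List (String × String))) :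
    (faqs.foldl (fun d faq =>
      let category := pvCat faq
      let d := if d.contains category = false then d.insert category [] else d
      d.insert category (d.getD category [] ++ [faq]))
      (PySem.Dict.empty : PySem.Dict String (List (List (String × String))))).items
    = (PySem.List.dedup (faqs.map pvCat)).map
        (fun c => (c, faqs.filter (fun f => pvCat f == c))) := by
  have hfold : (faqs.foldl (fun d faq =>
      let category := pvCat faq
      let d := if d.contains category = false then d.insert category [] else d
      d.insert category (d.getD category [] ++ [faq]))
      (PySem.Dict.empty : PySem.Dict String (List (List (String × String)))))
      = faqs.foldl (fun d faq => d.modify (pvCat faq) [] (· ++ [faq])) PySem.Dict.empty := by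
    apply PySem.List.foldl_congr_mem
    intro d faq _
    exact pvStep_eq_modify d faq
  rw [hfold]
  set D := faqs.foldl (fun d faq => d.modify (pvCat faq) [] (· ++ [faq])) PySem.Dict.empty with hD
  have hkeys : D.keys = PySem.List.dedup (faqs.map pvCat) := by
    rw [hD, PySem.Dict.keys_foldl_modify_key]
    simp [PySem.Set.update, PySem.Set.ofList_eq_foldl, PySem.List.dedup_eq_ofList,
          PySem.Dict.keys_empty]
  have hnd : D.keys.Nodup := by
    rw [hkeys]; exact PySem.List.nodup_dedup _
  have hgetD : ∀ c, D.getD c [] = faqs.filter (fun f => pvCat f == c) := by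
    intro c
    have : D = (faqs.map (fun f => (pvCat f, f))).foldl
        (fun d p => d.modify p.1 [] (· ++ [p.2])) PySem.Dict.empty := by
      rw [hD, List.foldl_map]
    rw [this, PySem.Dict.getD_foldl_modify_append]
    simp [List.filter_map, Function.comp_def]
  rw [PySem.Dict.items_eq_map_keys D hnd []]
  rw [hkeys]
  apply List.map_congr_left
  intro c _
  rw [hgetD]

-- a left fold that only appends text equals the seed followed by the join of the pieces
theorem pvJoin_foldl (l : List String) : ∀ (a : String),
    l.foldl (fun r s => r ++ s) a = a ++ String.join l := by
  induction l with
  | nil => intro a; simp [String.join]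
  | cons x xs ih =>
      intro a
      simp only [String.join, List.foldl_cons]
      rw [ih, ih]
      simp [String.append_assoc]

theorem pvFoldl_append_join {α : Type} (f : α → String) (l : List α) (h : String) :
    l.foldl (fun h x => h ++ f x) h = h ++ String.join (l.map f) := by
  have := pvJoin_foldl (l.map f) h
  rw [List.foldl_map] at this
  exact this

-- A's per-category loop body produces exactly B's section string
theorem pvBody_eq_section (faqs : List (List (String × String))) (h : String)
    (c : String) :
    (let h := h ++ pvS_ch1 ++ c ++ pvS_ch2
     let h := (faqs.filter (fun f => pvCat f == c)).foldl (fun h faq =>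
          h ++ pvS_it1 ++ PySem.Dict.getD (PySem.Dict.mk faq) "priority" "medium" ++ pvS_it2 ++
          PySem.Dict.getD (PySem.Dict.mk faq) "question" "" ++ pvS_it3 ++
          PySem.Dict.getD (PySem.Dict.mk faq) "answer" "" ++ pvS_it4) h
     h ++ "</div></div>")
    = h ++ pvBSection faqs c := by
  simp only [pvBSection]
  have : ∀ (l : List (List (String × String))) (h0 : String),
      l.foldl (fun h faq =>
          h ++ pvS_it1 ++ PySem.Dict.getD (PySem.Dict.mk faq) "priority" "medium" ++ pvS_it2 ++
          PySem.Dict.getD (PySem.Dict.mk faq) "question" "" ++ pvS_it3 ++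
          PySem.Dict.getD (PySem.Dict.mk faq) "answer" "" ++ pvS_it4) h0
      = h0 ++ String.join (l.map pvBItem) := by
    intro l h0
    have := pvFoldl_append_join pvBItem l h0
    simpa [pvBItem, String.append_assoc] using this
  rw [this]
  simp [String.append_assoc]

-- ===== VERDICT (by name: the statement is the Claim_ definition above) =====
theorem format_faqs_html_py_spec : Claim_equal_format_faqs_html_py := by
  intro faqs target_audience _
  unfold Spec_format_faqs_html_py format_faqs_html_py format_faqs_html_py_alt
  simp only []
  rw [pvItems_char, List.foldl_map]
  congr 1
  refine Eq.trans
    (PySem.List.foldl_congr_mem _ _ (fun h c => h ++ pvBSection faqs c) _ ?_)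
    (pvFoldl_append_join (pvBSection faqs) _ _)
  intro acc c _
  simpa using pvBody_eq_section faqs acc c
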